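-- pv_equiv track=rewrite | github.com/vegerot/sapling | eden/scm/sapling/match.py | _globpatsplit
-- ===== SOURCE A (Python) =====
-- from typing import List, Optional, Pattern, Sized, Tuple
--
-- def _globpatsplit(pat) -> List[str]:
--     """Split a glob pattern. Return a list.
--
--     A naive version is "path.split("/")". This function handles more cases, like
--     "{*,{a,b}*/*}".
--
--     >>> _globpatsplit("*/**/x/{a,b/c}")
--     ['*', '**', 'x', '{a,b/c}']
--     """
--     result = []
--     buf = ""
--     parentheses = 0
--     for ch in pat:
--         if ch == "{":
--             parentheses += 1
--         elif ch == "}":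
--             parentheses -= 1
--         if parentheses == 0 and ch == "/":
--             if buf:
--                 result.append(buf)
--                 buf = ""
--         else:
--             buf += ch
--     if buf:
--         result.append(buf)
--     return result
-- ===== SOURCE B (Python) =====
-- def _globpatsplit(pat):
--     # Two-phase: find top-level '/' boundary indices, then slice out the
--     # non-empty substrings between consecutive boundaries.
--     cuts = []
--     depth = 0
--     for i, ch in enumerate(pat):
--         if ch == "{":
--             depth += 1
--         elif ch == "}":
--             depth -= 1
--         if depth == 0 and ch == "/":
--             cuts.append(i)
--     segs = []
--     prev = 0
--     for i in cuts + [len(pat)]: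
--         if i > prev:
--             segs.append(pat[prev:i])
--         prev = i + 1
--     return segs
-- ===== Notes on version B (the rewrite author's own statement) =====
-- stated objective: alternative
-- what changed: B separates boundary detection from segment extraction: a first pass records the indices of top-level slashes, a second pass slices the original string between consecutive boundaries and keeps only non-empty slices, instead of A's single pass accumulating characters into a buffer.
import Mathlib
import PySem

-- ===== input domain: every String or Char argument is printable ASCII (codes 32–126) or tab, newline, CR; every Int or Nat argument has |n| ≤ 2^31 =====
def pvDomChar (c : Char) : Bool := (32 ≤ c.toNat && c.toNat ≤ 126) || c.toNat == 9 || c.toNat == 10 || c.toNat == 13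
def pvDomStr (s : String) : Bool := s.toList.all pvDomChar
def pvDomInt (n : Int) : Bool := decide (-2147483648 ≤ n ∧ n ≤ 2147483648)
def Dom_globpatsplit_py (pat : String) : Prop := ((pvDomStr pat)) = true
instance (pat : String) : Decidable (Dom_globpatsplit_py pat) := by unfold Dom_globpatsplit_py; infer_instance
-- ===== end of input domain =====

-- B splits by first recording top-level '/' indices and then slicing the string
-- between consecutive boundaries (alternative decomposition, same cost as A).

-- ===== PORT A =====
-- A's single loop: state (result, buf, parentheses); buf kept as List Char,
-- turned into a String exactly where Python appends it to the result.
def globAuxA : List Char → List String → List Char → Int → List String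
  | [], res, buf, _ => if buf = [] then res else res ++ [String.mk buf]
  | ch :: rest, res, buf, par =>
    let par' : Int := if ch = '{' then par + 1 else if ch = '}' then par - 1 else par
    if par' = 0 ∧ ch = '/' then
      globAuxA rest (if buf = [] then res else res ++ [String.mk buf]) [] par'
    else
      globAuxA rest res (buf ++ [ch]) par'

def globpatsplit_py (pat : String) : List String :=
  globAuxA pat.toList [] [] 0

-- ===== PORT B =====
-- first pass of Source B: enumerate(pat) collecting indices of top-level slashes
def cutsAux : List Char → Nat → Int → List Nat
  | [], _, _ => []
  | ch :: rest, i, depth =>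
    let depth' : Int := if ch = '{' then depth + 1 else if ch = '}' then depth - 1 else depth
    (if depth' = 0 ∧ ch = '/' then [i] else []) ++ cutsAux rest (i + 1) depth'

-- second pass of Source B: walk boundaries, slice pat[prev:i] (exact: 0 ≤ prev, i ≤ len)
def segsAux : List Nat → Nat → List Char → List String
  | [], _, _ => []
  | i :: rest, prev, cs =>
    (if prev < i then [String.mk ((cs.drop prev).take (i - prev))] else []) ++
      segsAux rest (i + 1) cs

def globpatsplit_py_alt (pat : String) : List String :=
  segsAux (cutsAux pat.toList 0 0 ++ [pat.toList.length]) 0 pat.toList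

-- ===== PRECONDITION & SPEC =====
def Spec_globpatsplit_py (pat : String) (out : List String) : Prop := out = globpatsplit_py_alt pat
instance (pat : String) (out : List String) : Decidable (Spec_globpatsplit_py pat out) := by unfold Spec_globpatsplit_py; infer_instance

-- ===== CLAIM (what is proved, stated in full; the proofs are below) =====
def Claim_equal_globpatsplit_py : Prop := ∀ (pat : String), Dom_globpatsplit_py pat → Spec_globpatsplit_py pat (globpatsplit_py pat)

-- ===== LEMMAS AND PROOFS =====

-- reference split: (first segment, later segments), keeping empty segments
def splitRef : List Char → Int → List Char × List (List Char)
  | [], _ => ([], [])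
  | ch :: rest, d =>
    let d' : Int := if ch = '{' then d + 1 else if ch = '}' then d - 1 else d
    let p := splitRef rest d'
    if d' = 0 ∧ ch = '/' then ([], p.1 :: p.2)
    else (ch :: p.1, p.2)

-- drop empty segments, stringify the rest
def clean (ss : List (List Char)) : List String :=
  ss.filterMap (fun s => if s = [] then none else some (String.mk s))

theorem globAuxA_eq (cs : List Char) : ∀ (res : List String) (buf : List Char) (d : Int),
    globAuxA cs res buf d =
      res ++ clean ((buf ++ (splitRef cs d).1) :: (splitRef cs d).2) := by
  induction cs with
  | nil =>
    intro res buf d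
    simp [globAuxA, splitRef, clean]
    split_ifs <;> simp_all
  | cons ch rest ih =>
    intro res buf d
    simp only [globAuxA, splitRef]
    set d' : Int := if ch = '{' then d + 1 else if ch = '}' then d - 1 else d with hd'
    by_cases h : d' = 0 ∧ ch = '/'
    · simp only [h, ih]
      by_cases hb : buf = [] <;> simp [hb, clean]
    · simp only [if_neg h, ih]
      simp [clean]

theorem segsAux_eq (full : List Char) : ∀ (cs : List Char) (i prev : Nat) (d : Int),
    full.drop i = cs → prev ≤ i → i ≤ full.length →
    segsAux (cutsAux cs i d ++ [full.length]) prev full =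
      clean ((((full.drop prev).take (i - prev)) ++ (splitRef cs d).1) :: (splitRef cs d).2) := by
  intro cs
  induction cs with
  | nil =>
    intro i prev d hdrop hpi hil
    have hi : i = full.length := by
      have := List.drop_eq_nil_iff.mp hdrop
      omega
    subst hi
    simp only [cutsAux, splitRef, List.nil_append, segsAux, List.append_nil]
    have htake : (full.drop prev).take (full.length - prev) = full.drop prev := by
      apply List.take_of_length_le; simp
    rw [htake]
    by_cases h : prev < full.length
    · have hne : full.drop prev ≠ [] := by
        intro hc
        have := List.drop_eq_nil_iff.mp hc
        omega
      simp [h, clean, hne]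
    · have hnil : full.drop prev = [] := by
        apply List.drop_eq_nil_of_le; omega
      simp [h, clean, hnil]
  | cons ch rest ih =>
    intro i prev d hdrop hpi hil
    have hilt : i < full.length := by
      by_contra hc
      have : full.drop i = [] := List.drop_eq_nil_of_le (by omega)
      rw [hdrop] at this; exact List.cons_ne_nil _ _ this
    have hdrop' : full.drop (i + 1) = rest := by
      have h1 : full.drop (i+1) = (full.drop i).drop 1 := by
        rw [List.drop_drop]
      rw [h1, hdrop]; rfl
    have hget : full[i]'hilt = ch := by
      have h0 : (List.drop i full)[0]'(by simp [hdrop]) = ch := by simp [hdrop]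
      simpa using h0
    simp only [cutsAux, splitRef]
    set d' : Int := if ch = '{' then d + 1 else if ch = '}' then d - 1 else d with hd'
    by_cases h : d' = 0 ∧ ch = '/'
    · simp only [if_pos h, List.nil_append, List.cons_append, segsAux]
      rw [ih (i+1) (i+1) d' hdrop' (le_refl _) (by omega)]
      simp only [Nat.sub_self, List.take_zero, List.nil_append]
      by_cases hpe : prev < i
      · have hne : (full.drop prev).take (i - prev) ≠ [] := by
          simp only [ne_eq, List.take_eq_nil_iff, not_or]
          constructor
          · omega
          · intro hc
            have := List.drop_eq_nil_iff.mp hc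
            omega
        simp [hpe, clean, hne]
      · have hpi' : prev = i := by omega
        subst hpi'
        simp [clean]
    · simp only [if_neg h, List.nil_append]
      rw [ih (i+1) prev d' hdrop' (by omega) (by omega)]
      have hlen : i - prev < (full.drop prev).length := by
        simp; omega
      have htake : (full.drop prev).take (i + 1 - prev) =
          (full.drop prev).take (i - prev) ++ [ch] := by
        have hs : (full.drop prev).take (i - prev + 1) =
            (full.drop prev).take (i - prev) ++ [(full.drop prev)[i - prev]'hlen] :=
          List.take_succ_eq_append_getElem hlen
        rw [show i + 1 - prev = i - prev + 1 by omega, hs]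
        congr 1
        have hg : (full.drop prev)[i - prev]'hlen = full[prev + (i - prev)]'(by omega) := by
          simp [List.getElem_drop]
        rw [hg]
        have h2 : prev + (i - prev) = i := by omega
        simp only [h2]
        rw [hget]
      rw [htake]
      simp

-- ===== VERDICT (by name: the statement is the Claim_ definition above) =====
theorem globpatsplit_py_spec : Claim_equal_globpatsplit_py := by
  intro pat _
  unfold Spec_globpatsplit_py globpatsplit_py globpatsplit_py_alt
  rw [globAuxA_eq, segsAux_eq pat.toList pat.toList 0 0 0 (by simp) (le_refl _) (by simp)]
  simp
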